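-- pv_equiv track=rewrite | github.com/PittYHL/DP_MBQC | DP.py | check_valid_start_end
-- ===== SOURCE A (Python) =====
-- def check_valid_start_end(start, end):
--     valid = 1
--     if len(start) != 0:
--         for i in range(len(start) - 1):
--             if abs(start[i + 1][0] - start[i][0]) < 2:
--                 return 0
--     temp_end = []
--     end_index = []
--     for i in range(len(end)):
--         if end[i] != []:
--             temp_end.append(end[i])
--             end_index.append(i)
--     if len(temp_end) != 0:
--         for i in range(len(temp_end) - 1):
--             if temp_end[i + 1][0] - temp_end[i][0] < 2 * (end_index[i + 1] - end_index[i]): #why abs?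
--                 return 0
--     return 1
-- ===== SOURCE B (Python) =====
-- def _spaced(xs):
--     # recursion on the list structure: adjacent first coordinates differ by >= 2
--     return len(xs) < 2 or (abs(xs[1][0] - xs[0][0]) >= 2 and _spaced(xs[1:]))
--
-- def check_valid_start_end(start, end):
--     # potential-function view of the end check: with f(i) = end[i][0] - 2*i over the
--     # non-empty entries, A's gap condition holds iff the f-list is already sorted.
--     keys = [e[0] - 2 * i for i, e in enumerate(end) if e]
--     return int(_spaced(start) and keys == sorted(keys))
-- ===== Notes on version B (the rewrite author's own statement) =====
-- stated objective: alternative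
-- what changed: The end check is re-derived via the potential function f(i)=end[i][0]-2*i: A's pairwise gap condition over consecutive non-empty entries holds iff the list of f-values is already sorted, so B builds that key list once and compares it with sorted(keys); the start check becomes a structural recursion instead of an indexed loop, and B composes the two boolean results instead of early returns.
-- outside the precondition, e.g. on check_valid_start_end([[0], [1], []], []): A returns 0, B returns 0
import Mathlib
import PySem

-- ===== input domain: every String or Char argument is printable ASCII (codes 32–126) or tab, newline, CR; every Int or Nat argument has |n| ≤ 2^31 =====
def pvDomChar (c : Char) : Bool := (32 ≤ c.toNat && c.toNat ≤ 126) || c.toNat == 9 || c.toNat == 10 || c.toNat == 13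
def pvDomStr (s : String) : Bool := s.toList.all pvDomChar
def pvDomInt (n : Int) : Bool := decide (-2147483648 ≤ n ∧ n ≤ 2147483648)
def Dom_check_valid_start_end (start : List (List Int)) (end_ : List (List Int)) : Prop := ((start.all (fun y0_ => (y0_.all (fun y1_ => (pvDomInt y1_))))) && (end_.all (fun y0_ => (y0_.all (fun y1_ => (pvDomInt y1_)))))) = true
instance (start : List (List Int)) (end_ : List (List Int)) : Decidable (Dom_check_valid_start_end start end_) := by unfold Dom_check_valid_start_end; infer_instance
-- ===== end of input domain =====

-- B replaces A's filtered pairwise gap check by a potential-function reformulation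
-- (keys e[0]-2*i of the non-empty entries must be an already-sorted list, checked
-- against PySem.List.sorted) and checks start by structural recursion; objective:
-- alternative, same task, different algorithm.


-- ===== PORT A =====
-- Python's abs on Int
def pyAbs (x : Int) : Int := if x < 0 then -x else x

-- A's first loop: for i in range(len(start)-1): if abs(start[i+1][0]-start[i][0]) < 2: return 0
-- (early return modelled as List.any over the same range; pyGetD is in range under Pre_)
def aStartFail (start : List (List Int)) : Bool :=
  (PySem.List.pyRange 0 ((start.length : Int) - 1) 1).any (fun i =>
    pyAbs (PySem.List.pyGetD (PySem.List.pyGetD start (i + 1) []) 0 0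
         - PySem.List.pyGetD (PySem.List.pyGetD start i []) 0 0) < 2)

-- A's filter loop: for i in range(len(end)): if end[i] != []: temp_end.append(end[i]); end_index.append(i)
def aFilter (end_ : List (List Int)) : List (List Int) × List Int :=
  (PySem.List.pyRange 0 (end_.length : Int) 1).foldl
    (fun acc i =>
      if PySem.List.pyGetD end_ i [] ≠ [] then
        (acc.1 ++ [PySem.List.pyGetD end_ i []], acc.2 ++ [i])
      else acc)
    ([], [])

-- A's second loop over temp_end / end_index (early return as List.any)
def aEndFail (temp : List (List Int)) (idx : List Int) : Bool :=
  (PySem.List.pyRange 0 ((temp.length : Int) - 1) 1).any (fun i =>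
    PySem.List.pyGetD (PySem.List.pyGetD temp (i + 1) []) 0 0
      - PySem.List.pyGetD (PySem.List.pyGetD temp i []) 0 0
      < 2 * (PySem.List.pyGetD idx (i + 1) 0 - PySem.List.pyGetD idx i 0))

def check_valid_start_end (start : List (List Int)) (end_ : List (List Int)) : Int :=
  if start.length ≠ 0 ∧ aStartFail start then 0
  else
    let p := aFilter end_
    if p.1.length ≠ 0 ∧ aEndFail p.1 p.2 then 0 else 1

-- ===== PORT B =====
-- B's _spaced: len(xs) < 2 or (abs(xs[1][0]-xs[0][0]) >= 2 and _spaced(xs[1:]))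
def bSpaced : List (List Int) → Bool
  | x :: y :: r =>
      decide (2 ≤ pyAbs (PySem.List.pyGetD y 0 0 - PySem.List.pyGetD x 0 0)) && bSpaced (y :: r)
  | _ => true

-- B's keys: [e[0] - 2*i for i, e in enumerate(end) if e]
def bKeys (end_ : List (List Int)) : List Int :=
  ((PySem.List.enumerate end_ 0).filter (fun q => q.2 ≠ [])).map
    (fun q => PySem.List.pyGetD q.2 0 0 - 2 * q.1)

def check_valid_start_end_alt (start : List (List Int)) (end_ : List (List Int)) : Int :=
  let keys := bKeys end_
  if bSpaced start && decide (keys = PySem.List.sorted keys (fun x => x) false) then 1 else 0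

-- ===== PRECONDITION & SPEC =====
-- Pre_ excludes start lists of length ≥ 2 containing an empty sublist: on them A's
-- start[i][0] raises IndexError, except when an earlier adjacent pair already triggers the
-- return-0 short-circuit (B behaves identically there, see the claim's cites).
def Pre_check_valid_start_end (start : List (List Int)) (end_ : List (List Int)) : Prop :=
  start.length ≤ 1 ∨ ∀ l ∈ start, l ≠ []
instance (start : List (List Int)) (end_ : List (List Int)) : Decidable (Pre_check_valid_start_end start end_) := by unfold Pre_check_valid_start_end; infer_instance

def pvWitness_check_valid_start_end : List (List Int) × List (List Int) :=
  ([[0], [5]], [[1], [], [4]])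

def Spec_check_valid_start_end (start : List (List Int)) (end_ : List (List Int)) (out : Int) : Prop := out = check_valid_start_end_alt start end_
instance (start : List (List Int)) (end_ : List (List Int)) (out : Int) : Decidable (Spec_check_valid_start_end start end_ out) := by unfold Spec_check_valid_start_end; infer_instance

-- ===== CLAIM (what is proved, stated in full; the proofs are below) =====
def Claim_equal_check_valid_start_end : Prop := ∀ (start : List (List Int)) (end_ : List (List Int)), Dom_check_valid_start_end start end_ → Pre_check_valid_start_end start end_ → Spec_check_valid_start_end start end_ (check_valid_start_end start end_)

-- ===== LEMMAS AND PROOFS =====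

-- generic adjacent-pair "any"
def pairsAny {α : Type} (p : α → α → Bool) : List α → Bool
  | a :: b :: r => p a b || pairsAny p (b :: r)
  | _ => false

-- a range-indexed adjacent scan is pairsAny
theorem range_any_pairs {α : Type} (d : α) (p : α → α → Bool) :
    ∀ xs : List α,
      (List.range (xs.length - 1)).any (fun k => p (xs.getD k d) (xs.getD (k + 1) d))
        = pairsAny p xs
  | [] => by simp [pairsAny]
  | [a] => by simp [pairsAny]
  | a :: b :: r => by
    have ih := range_any_pairs d p (b :: r)
    simp only [List.length_cons, Nat.add_sub_cancel, List.range_succ_eq_map, List.any_cons,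
      List.any_map, Function.comp_def, List.getD_cons_succ, List.getD_cons_zero] at *
    rw [ih]; rfl

-- the adjacent-pair condition of the start check
def startP (a b : List Int) : Bool :=
  decide (pyAbs (PySem.List.pyGetD b 0 0 - PySem.List.pyGetD a 0 0) < 2)

theorem aStartFail_eq (start : List (List Int)) :
    aStartFail start = pairsAny startP start := by
  rw [← range_any_pairs ([] : List Int)]
  unfold aStartFail
  rw [PySem.List.pyRange_one, List.any_map]
  have h : ((start.length : Int) - 1 - 0).toNat = start.length - 1 := by omega
  rw [h]
  apply PySem.List.any_congr_mem
  intro k hk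
  simp only [Function.comp_def, zero_add]
  have hc : ((k : Int) + 1) = ((k + 1 : Nat) : Int) := by push_cast; ring
  rw [hc]
  simp only [startP, PySem.List.pyGetD_natCast, List.getD_eq_getElem?_getD]

theorem bSpaced_eq : ∀ start : List (List Int),
    bSpaced start = !pairsAny startP start
  | [] => rfl
  | [a] => rfl
  | a :: b :: r => by
    have ih := bSpaced_eq (b :: r)
    simp only [bSpaced, pairsAny, ih, startP, Bool.not_or]
    congr 1
    rw [← decide_not, decide_eq_decide]
    omega

-- the adjacent-pair condition of the end check, on (index, entry) pairs
def endP (x y : Int × List Int) : Bool :=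
  decide (PySem.List.pyGetD y.2 0 0 - PySem.List.pyGetD x.2 0 0 < 2 * (y.1 - x.1))

-- A's filter loop builds exactly the non-empty entries of enumerate, split into two lists
theorem aFilter_go (n : Nat) (ys : List (List Int)) (k : Nat) (acc : List (List Int) × List Int)
    (hn : ys.length - k ≤ n) :
    (PySem.List.pyRange (k : Int) (ys.length : Int) 1).foldl
      (fun acc i =>
        if PySem.List.pyGetD ys i [] ≠ [] then
          (acc.1 ++ [PySem.List.pyGetD ys i []], acc.2 ++ [i])
        else acc) acc
    = (acc.1 ++ (((PySem.List.enumerate (ys.drop k) (k : Int)).filter (fun q => q.2 ≠ [])).map (·.2)),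
       acc.2 ++ (((PySem.List.enumerate (ys.drop k) (k : Int)).filter (fun q => q.2 ≠ [])).map (·.1))) := by
  induction n generalizing k acc with
  | zero =>
    have hk : ys.length ≤ k := by omega
    have h1 : PySem.List.pyRange (k : Int) (ys.length : Int) 1 = [] :=
      PySem.List.pyRange_one_eq_nil (by exact_mod_cast hk)
    have h2 : ys.drop k = [] := List.drop_eq_nil_of_le hk
    simp [h1, h2, PySem.List.enumerate_nil]
  | succ n ih =>
    by_cases hk : k < ys.length
    · rw [PySem.List.pyRange_one_cons (by exact_mod_cast hk)]
      have hd : ys.drop k = ys[k] :: ys.drop (k + 1) := (List.getElem_cons_drop hk).symm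
      have hget : PySem.List.pyGetD ys (k : Int) [] = ys[k] := by
        simp [PySem.List.pyGetD_natCast, List.getD_eq_getElem?_getD, List.getElem?_eq_getElem hk]
      have hcast : ((k : Int) + 1) = ((k + 1 : Nat) : Int) := by push_cast; ring
      rw [List.foldl_cons]
      simp only [hget]
      rw [hcast, ih (k + 1) _ (by omega)]
      rw [hd, PySem.List.enumerate_cons, List.filter_cons]
      by_cases he : ys[k] = []
      · simp [he]
      · simp [he]
    · have h1 : PySem.List.pyRange (k : Int) (ys.length : Int) 1 = [] :=
        PySem.List.pyRange_one_eq_nil (by exact_mod_cast Nat.le_of_not_lt hk)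
      have h2 : ys.drop k = [] := List.drop_eq_nil_of_le (Nat.le_of_not_lt hk)
      simp [h1, h2, PySem.List.enumerate_nil]

theorem aFilter_eq (end_ : List (List Int)) :
    aFilter end_ =
      (((PySem.List.enumerate end_ 0).filter (fun q => q.2 ≠ [])).map (·.2),
       ((PySem.List.enumerate end_ 0).filter (fun q => q.2 ≠ [])).map (·.1)) := by
  have := aFilter_go end_.length end_ 0 ([], []) (by omega)
  simpa [aFilter] using this

-- A's second scan over the two parallel lists is pairsAny endP on the filtered pairs
theorem aEndFail_eq (F : List (Int × List Int)) :
    aEndFail (F.map (·.2)) (F.map (·.1)) = pairsAny endP F := by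
  rw [← range_any_pairs ((0 : Int), ([] : List Int)) endP]
  unfold aEndFail
  rw [PySem.List.pyRange_one, List.any_map]
  have h : (((F.map (·.2)).length : Int) - 1 - 0).toNat = F.length - 1 := by
    simp
  rw [h]
  apply PySem.List.any_congr_mem
  intro k hk
  simp only [Function.comp_def, zero_add]
  have hc : ((k : Int) + 1) = ((k + 1 : Nat) : Int) := by push_cast; ring
  rw [hc]
  simp only [PySem.List.pyGetD_natCast, endP]
  rw [show ([] : List Int) = (·.2) ((0:Int), ([] : List Int)) from rfl,
      show (0 : Int) = (·.1) ((0:Int), ([] : List Int)) from rfl]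
  rw [List.getD_map, List.getD_map, List.getD_map, List.getD_map]

-- the key of one (index, entry) pair
def keyF (q : Int × List Int) : Int := PySem.List.pyGetD q.2 0 0 - 2 * q.1

-- endP is exactly a key inversion
theorem pairsAny_endP_map : ∀ F : List (Int × List Int),
    pairsAny endP F = pairsAny (fun a b : Int => decide (b < a)) (F.map keyF)
  | [] => rfl
  | [x] => rfl
  | x :: y :: r => by
    have ih := pairsAny_endP_map (y :: r)
    simp only [pairsAny, List.map_cons] at *
    rw [ih]
    congr 1
    simp only [endP, keyF, decide_eq_decide]
    omega

-- no adjacent inversion ⟺ pairwise nondecreasing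
theorem pairsAny_lt_false_iff : ∀ l : List Int,
    pairsAny (fun a b : Int => decide (b < a)) l = false ↔ l.Pairwise (· ≤ ·)
  | [] => by simp [pairsAny]
  | [x] => by simp [pairsAny]
  | x :: y :: r => by
    have ih := pairsAny_lt_false_iff (y :: r)
    simp only [pairsAny, Bool.or_eq_false_iff, decide_eq_false_iff_not, not_lt, ih]
    constructor
    · rintro ⟨hxy, hp⟩
      refine List.pairwise_cons.mpr ⟨?_, hp⟩
      intro z hz
      rcases List.mem_cons.mp hz with rfl | hz
      · exact hxy
      · exact le_trans hxy (List.rel_of_pairwise_cons hp hz)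
    · intro hp
      exact ⟨List.rel_of_pairwise_cons hp (by simp), hp.sublist (List.sublist_cons_self _ _)⟩

-- a list equals its own stable sort ⟺ it is pairwise nondecreasing
theorem self_eq_sorted_iff (l : List Int) :
    l = PySem.List.sorted l (fun x => x) false ↔ l.Pairwise (· ≤ ·) := by
  constructor
  · intro h
    have := PySem.List.sorted_pairwise (xs := l) (key := fun x : Int => x)
    rw [← h] at this
    simpa using this
  · intro h
    have h' : l.Pairwise (fun a b => (fun x : Int => x) a ≤ (fun x : Int => x) b) := by
      simpa using h
    exact (PySem.List.sorted_eq_self_of_pairwise l (fun x : Int => x) h').symm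

-- pairsAny needs two elements to fire
theorem pairsAny_ne_nil {α : Type} {p : α → α → Bool} {l : List α}
    (h : pairsAny p l = true) : l ≠ [] := by
  intro hnil; subst hnil; simp [pairsAny] at h

-- ===== VERDICT (by name: the statement is the Claim_ definition above) =====
theorem check_valid_start_end_spec : Claim_equal_check_valid_start_end := by
  intro start end_ _ _
  unfold Spec_check_valid_start_end check_valid_start_end check_valid_start_end_alt
  rw [aStartFail_eq, aFilter_eq, bSpaced_eq]
  simp only [aEndFail_eq, ne_eq]
  set F := (PySem.List.enumerate end_ 0).filter (fun q => q.2 ≠ []) with hF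
  have hkeys : bKeys end_ = F.map keyF := rfl
  have hend : pairsAny endP F = false ↔
      bKeys end_ = PySem.List.sorted (bKeys end_) (fun x => x) false := by
    rw [self_eq_sorted_iff, hkeys, ← pairsAny_lt_false_iff, pairsAny_endP_map]
  by_cases hs : pairsAny startP start = true
  · have hne : ¬start.length = 0 := by
      simpa [List.length_eq_zero_iff] using pairsAny_ne_nil hs
    rw [if_pos ⟨hne, hs⟩, if_neg (by simp [hs])]
  · have hs' : pairsAny startP start = false := by simpa using hs
    by_cases he : pairsAny endP F = true
    · have hFne : F ≠ [] := pairsAny_ne_nil he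
      have hne : ¬(F.map (·.2)).length = 0 := by
        simpa [List.length_eq_zero_iff] using hFne
      have hkne : ¬ bKeys end_ = PySem.List.sorted (bKeys end_) (fun x => x) false := by
        intro h
        rw [hend.mpr h] at he
        exact Bool.false_ne_true he
      rw [if_neg (by simp [hs']), if_pos ⟨hne, he⟩,
          if_neg (by simp only [hs', Bool.not_false, Bool.true_and, decide_eq_true_eq]; exact hkne)]
    · have he' : pairsAny endP F = false := by simpa using he
      have hk := hend.mp he'
      rw [if_neg (by simp [hs']), if_neg (by simp [he']),
          if_pos (by simp only [hs', Bool.not_false, Bool.true_and, decide_eq_true_eq]; exact hk)]
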